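-- pv_equiv track=rewrite | github.com/KadafiBelajar/gamematematika | backend/text_humanizer.py | _adjust_tone
-- ===== SOURCE A (Python) =====
-- def _adjust_tone(text: str, scope: str, audience: str) -> str:
--     """Adjust tone based on scope and audience"""
--     if scope == 'casual':
--         # Add contractions
--         contractions = {
--             'do not': "don't",
--             'cannot': "can't",
--             'will not': "won't",
--             'it is': "it's",
--             'that is': "that's"
--         }
--         for full, short in contractions.items():
--             text = text.replace(full, short)
--
--     elif scope == 'academic':
--         # Remove contractions
--         expansions = {
--             "don't": 'do not',
--             "can't": 'cannot',
--             "won't": 'will not',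
--             "it's": 'it is',
--             "that's": 'that is'
--         }
--         for short, full in expansions.items():
--             text = text.replace(short, full)
--
--     return text
-- ===== SOURCE B (Python) =====
-- def _adjust_tone(text: str, scope: str, audience: str) -> str:
--     """Adjust tone based on scope and audience (single left-to-right pass)."""
--     if scope == 'casual':
--         pairs = [('do not', "don't"), ('cannot', "can't"), ('will not', "won't"),
--                  ('it is', "it's"), ('that is', "that's")]
--     elif scope == 'academic':
--         pairs = [("don't", 'do not'), ("can't", 'cannot'), ("won't", 'will not'),
--                  ("it's", 'it is'), ("that's", 'that is')]
--     else:
--         return text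
--     out = []
--     i = 0
--     n = len(text)
--     while i < n:
--         for pat, rep in pairs:
--             if text.startswith(pat, i):
--                 out.append(rep)
--                 i += len(pat)
--                 break
--         else:
--             out.append(text[i])
--             i += 1
--     return ''.join(out)
-- ===== Notes on version B (the rewrite author's own statement) =====
-- stated objective: alternative
-- what changed: Replaces A's five sequential full-text .replace passes with a single left-to-right table-driven pass that at each position tries the five patterns and emits the replacement or the character, so replaced text is never rescanned by later patterns.
-- outside the precondition, e.g. on _adjust_tone('do nothat is', 'casual', ''): A returns "don'that's", B returns "don'that is"; on _adjust_tone("won'that's", 'academic', ''): A returns 'will nothat is', B returns "will nothat's"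
import Mathlib
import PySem

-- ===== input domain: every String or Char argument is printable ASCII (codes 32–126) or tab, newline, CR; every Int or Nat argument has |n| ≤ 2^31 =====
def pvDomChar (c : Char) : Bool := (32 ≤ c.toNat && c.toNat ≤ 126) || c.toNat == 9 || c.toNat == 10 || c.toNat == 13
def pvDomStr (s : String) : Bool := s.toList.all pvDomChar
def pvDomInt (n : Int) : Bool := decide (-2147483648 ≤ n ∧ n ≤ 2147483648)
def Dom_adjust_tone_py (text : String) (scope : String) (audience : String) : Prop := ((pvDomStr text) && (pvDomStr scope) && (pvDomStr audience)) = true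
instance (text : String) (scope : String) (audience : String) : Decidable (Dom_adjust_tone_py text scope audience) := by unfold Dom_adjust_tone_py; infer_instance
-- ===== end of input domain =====

-- B changes A's five sequential full-text .replace passes into one left-to-right table-driven
-- pass; they are proved equal on Pre_, which excludes the texts where a replacement re-forms
-- a later pattern across the replacement boundary (see the sentence above Pre_).

-- ===== PORT A =====
def adjust_tone_py (text : String) (scope : String) (audience : String) : String :=
  if scope = "casual" then
    [("do not", "don't"), ("cannot", "can't"), ("will not", "won't"),
     ("it is", "it's"), ("that is", "that's")].foldl
      (fun t pr => PySem.Str.replace t pr.1 pr.2) text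
  else if scope = "academic" then
    [("don't", "do not"), ("can't", "cannot"), ("won't", "will not"),
     ("it's", "it is"), ("that's", "that is")].foldl
      (fun t pr => PySem.Str.replace t pr.1 pr.2) text
  else text

-- ===== PORT B =====
-- the two replacement tables of Source B, over code points
def pvCasualPairs : List (List Char × List Char) :=
  [("do not".toList, "don't".toList), ("cannot".toList, "can't".toList),
   ("will not".toList, "won't".toList), ("it is".toList, "it's".toList),
   ("that is".toList, "that's".toList)]

def pvAcademicPairs : List (List Char × List Char) :=
  [("don't".toList, "do not".toList), ("can't".toList, "cannot".toList),
   ("won't".toList, "will not".toList), ("it's".toList, "it is".toList),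
   ("that's".toList, "that is".toList)]

-- Source B's single scan: at each position try the patterns in table order; on a match emit the
-- replacement and jump past the match, otherwise emit the character and advance by one.
-- (for a matched pattern p, dropping p.length from (c :: cs) is written as dropping
-- p.length - 1 from cs, which makes the recursion visibly decreasing; all patterns are nonempty)
-- the fuel argument counts the characters not yet consumed (Source B's n - i); it makes the
-- recursion structural.  pvScan calls it with fuel = length, on which it is exact.
def pvScanGo (pairs : List (List Char × List Char)) : Nat → List Char → List Char
  | _, [] => []
  | 0, _ :: _ => []
  | fuel + 1, c :: cs =>
    match pairs.find? (fun pr => pr.1.isPrefixOf (c :: cs)) with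
    | some pr => pr.2 ++ pvScanGo pairs fuel (cs.drop (pr.1.length - 1))
    | none => c :: pvScanGo pairs fuel cs

def pvScan (pairs : List (List Char × List Char)) (s : List Char) : List Char :=
  pvScanGo pairs s.length s

def adjust_tone_py_alt (text : String) (scope : String) (audience : String) : String :=
  if scope = "casual" then String.ofList (pvScan pvCasualPairs text.toList)
  else if scope = "academic" then String.ofList (pvScan pvAcademicPairs text.toList)
  else text

-- ===== PRECONDITION & SPEC =====
-- Pre_ excludes texts in which a replaced contraction's trailing 't' merges with the following
-- characters to re-form another pattern across the replacement boundary (texts containing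
-- 'do nothat is', 'cannothat is' or 'will nothat is' with scope 'casual', or "don'that's",
-- "can'that's" or "won'that's" with scope 'academic'): there A's later full-text .replace pass
-- rewrites the re-formed match while B's single pass replaces each original occurrence once;
-- the order in which overlapping, self-re-forming matches are applied is a corner no caller
-- specifies, and either value is defensible.
def Pre_adjust_tone_py (text : String) (scope : String) (audience : String) : Prop :=
  (scope = "casual" → (PySem.Str.isIn "do nothat is" text = false ∧
    PySem.Str.isIn "cannothat is" text = false ∧ PySem.Str.isIn "will nothat is" text = false)) ∧
  (scope = "academic" → (PySem.Str.isIn "don'that's" text = false ∧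
    PySem.Str.isIn "can'that's" text = false ∧ PySem.Str.isIn "won'that's" text = false))
instance (text : String) (scope : String) (audience : String) : Decidable (Pre_adjust_tone_py text scope audience) := by unfold Pre_adjust_tone_py; infer_instance

def pvWitness_adjust_tone_py : String × String × String := ("it is there, that is why I do not go", "casual", "")

def Spec_adjust_tone_py (text : String) (scope : String) (audience : String) (out : String) : Prop := out = adjust_tone_py_alt text scope audience
instance (text : String) (scope : String) (audience : String) (out : String) : Decidable (Spec_adjust_tone_py text scope audience out) := by unfold Spec_adjust_tone_py; infer_instance

-- ===== CLAIM (what is proved, stated in full; the proofs are below) =====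
def Claim_equal_adjust_tone_py : Prop := ∀ (text : String) (scope : String) (audience : String), Dom_adjust_tone_py text scope audience → Pre_adjust_tone_py text scope audience → Spec_adjust_tone_py text scope audience (adjust_tone_py text scope audience)

-- ===== LEMMAS AND PROOFS =====

-- a plain recursive presentation of PySem.Chars.replace (for a nonempty pattern)
def pvRepl (old new : List Char) : List Char → List Char
  | [] => []
  | c :: t =>
    if old.isPrefixOf (c :: t) then new ++ pvRepl old new (t.drop (old.length - 1))
    else c :: pvRepl old new t
termination_by s => s.length
decreasing_by
  · simp only [List.length_drop, List.length_cons]; omega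
  · simp

theorem pvRepl_go_eq (old new : List Char) (hold : old ≠ []) :
    ∀ (fuel : Nat) (l acc : List Char), l.length ≤ fuel →
      PySem.Chars.replace.go old new fuel l acc = acc.reverse ++ pvRepl old new l := by
  intro fuel
  induction fuel with
  | zero =>
      intro l acc hl
      have : l = [] := by cases l <;> simp_all
      subst this
      simp [PySem.Chars.replace.go, pvRepl]
  | succ n ih =>
      intro l acc hl
      cases l with
      | nil => simp [PySem.Chars.replace.go, pvRepl]
      | cons c t =>
          rw [PySem.Chars.replace.go.eq_def]
          simp only []
          by_cases hpre : old.isPrefixOf (c :: t) = true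
          · rw [if_pos hpre]
            have hlen : (List.drop old.length (c :: t)).length ≤ n := by
              simp only [List.length_drop, List.length_cons]
              have : 1 ≤ old.length := by cases old <;> simp_all
              simp only [List.length_cons] at hl
              omega
            rw [ih _ _ hlen]
            have hdrop : List.drop old.length (c :: t) = t.drop (old.length - 1) := by
              cases old with
              | nil => exact absurd rfl hold
              | cons o os => simp
            rw [hdrop]
            have : pvRepl old new (c :: t) = new ++ pvRepl old new (t.drop (old.length - 1)) := by
              rw [pvRepl]; rw [if_pos hpre]
            rw [this]
            simp
          · rw [if_neg hpre]
            have hlen : t.length ≤ n := by simp only [List.length_cons] at hl; omega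
            rw [ih _ _ hlen]
            have : pvRepl old new (c :: t) = c :: pvRepl old new t := by
              rw [pvRepl]; rw [if_neg hpre]
            rw [this]
            simp

theorem pvReplace_eq (s old new : List Char) (hold : old ≠ []) :
    PySem.Chars.replace s old new = pvRepl old new s := by
  rw [PySem.Chars.replace]
  have : old.isEmpty = false := by cases old <;> simp_all
  rw [this]
  simp only [Bool.false_eq_true, if_false]
  rw [pvRepl_go_eq old new hold s.length s [] (le_refl _)]
  simp

theorem pvRepl_nil (old new : List Char) : pvRepl old new [] = [] := by rw [pvRepl]

theorem pvRepl_cons_neg (old new : List Char) (c : Char) (t : List Char)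
    (h : ¬ old <+: (c :: t)) : pvRepl old new (c :: t) = c :: pvRepl old new t := by
  rw [pvRepl, if_neg]
  simp only [List.isPrefixOf_iff_prefix]
  exact h

theorem pvRepl_match (old new x : List Char) (hold : old ≠ []) :
    pvRepl old new (old ++ x) = new ++ pvRepl old new x := by
  cases old with
  | nil => exact absurd rfl hold
  | cons o os =>
      rw [List.cons_append, pvRepl, if_pos]
      · have : (os ++ x).drop ((o :: os).length - 1) = x := by
          simp only [List.length_cons, Nat.add_sub_cancel]
          exact List.drop_left
        rw [this]
      · simp only [List.isPrefixOf_iff_prefix]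
        exact ⟨x, by simp⟩

theorem pv_no_prefix_ext (p w x : List Char) (h1 : ¬ p <+: w) (h2 : ¬ w <+: p) :
    ¬ p <+: (w ++ x) := by
  intro h
  rcases Nat.le_total p.length w.length with hle | hle
  · exact h1 (List.prefix_of_prefix_length_le h (List.prefix_append w x) hle)
  · exact h2 (List.prefix_of_prefix_length_le (List.prefix_append w x) h hle)

-- commuting one replace pass over an unmatched front block
theorem pvRepl_skip (p r : List Char) :
    ∀ (a x : List Char), (∀ m, m < a.length → ¬ p <+: (a.drop m ++ x)) →
      pvRepl p r (a ++ x) = a ++ pvRepl p r x := by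
  intro a
  induction a with
  | nil => intro x _; simp
  | cons b a' ih =>
      intro x H
      rw [List.cons_append, pvRepl_cons_neg]
      · rw [ih x (fun m hm => H (m + 1) (by simp; omega))]
        rfl
      · have := H 0 (by simp)
        simpa using this

-- a prefix of the output of one replace pass is a prefix of its input, provided the prefix
-- cannot collide with the replacement string (instantiated with concrete w and r by decide)
theorem pvPres (p r : List Char) (hp : p ≠ []) :
    ∀ (w : List Char), (∀ w' ∈ w.tails, w' ≠ [] → ¬ w' <+: r ∧ ¬ r <+: w') →
      ∀ x, w <+: pvRepl p r x → w <+: x := by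
  intro w hw x
  induction x generalizing w with
  | nil =>
      rw [pvRepl_nil]
      intro h
      rw [List.prefix_nil] at h
      subst h
      exact List.nil_prefix
  | cons c t ih =>
      intro h
      by_cases hpre : p.isPrefixOf (c :: t) = true
      · rw [pvRepl, if_pos hpre] at h
        cases w with
        | nil => exact List.nil_prefix
        | cons d w' =>
            exfalso
            rcases Nat.le_total (d :: w').length r.length with hle | hle
            · exact ((hw _ (by rw [List.mem_tails]) (by simp)).1
                (List.prefix_of_prefix_length_le h (List.prefix_append r _) hle))
            · exact ((hw _ (by rw [List.mem_tails]) (by simp)).2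
                (List.prefix_of_prefix_length_le (List.prefix_append r _) h hle))
      · rw [pvRepl, if_neg hpre] at h
        cases w with
        | nil => exact List.nil_prefix
        | cons d w' =>
            rw [List.cons_prefix_cons] at h ⊢
            refine ⟨h.1, ih w' ?_ h.2⟩
            intro w'' hw'' hne
            exact hw _ (by rw [List.mem_tails] at hw'' ⊢; exact hw''.trans (List.suffix_cons d w')) hne


-- ---- pvScan unfolding lemmas ----

theorem pvScanGo_fuel (pairs : List (List Char × List Char)) :
    ∀ (f : Nat) (s : List Char), s.length ≤ f → pvScanGo pairs f s = pvScanGo pairs s.length s := by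
  intro f
  induction f using Nat.strong_induction_on with
  | _ f ih =>
    intro s hs
    cases s with
    | nil => cases f <;> rfl
    | cons c cs =>
      cases f with
      | zero => simp at hs
      | succ f' =>
        have hf' : cs.length ≤ f' := by simp only [List.length_cons] at hs; omega
        cases hfind : pairs.find? (fun pr => pr.1.isPrefixOf (c :: cs)) with
        | none =>
            simp only [List.length_cons, pvScanGo, hfind]
            rw [ih f' (by omega) cs hf']
        | some pr =>
            have hd : (cs.drop (pr.1.length - 1)).length ≤ cs.length := by
              simp only [List.length_drop]; omega
            simp only [List.length_cons, pvScanGo, hfind]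
            rw [ih f' (by omega) _ (le_trans hd hf'), ih cs.length (by omega) _ hd]

theorem pvScan_cons_some (pairs : List (List Char × List Char)) (c : Char) (cs : List Char)
    (p r : List Char) (h : pairs.find? (fun pr => pr.1.isPrefixOf (c :: cs)) = some (p, r)) :
    pvScan pairs (c :: cs) = r ++ pvScan pairs (cs.drop (p.length - 1)) := by
  unfold pvScan
  simp only [List.length_cons, pvScanGo, h]
  rw [pvScanGo_fuel pairs cs.length _ (by simp only [List.length_drop]; omega)]

theorem pvScan_cons_none (pairs : List (List Char × List Char)) (c : Char) (cs : List Char)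
    (h : pairs.find? (fun pr => pr.1.isPrefixOf (c :: cs)) = none) :
    pvScan pairs (c :: cs) = c :: pvScan pairs cs := by
  unfold pvScan
  simp only [List.length_cons, pvScanGo, h]

-- ---- Bool bridges ----

theorem pv_isPrefixOf_true (p s : List Char) (h : p <+: s) : p.isPrefixOf s = true :=
  List.isPrefixOf_iff_prefix.mpr h

theorem pv_isPrefixOf_false (p s : List Char) (h : ¬ p <+: s) : ¬ p.isPrefixOf s = true :=
  fun hx => h (List.isPrefixOf_iff_prefix.mp hx)

-- ---- decidable-condition variants of the commuting lemma ----

theorem pvRepl_skip' (p r a : List Char)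
    (Hd : ∀ m, m < a.length → ¬ p <+: a.drop m ∧ ¬ a.drop m <+: p) :
    ∀ x, pvRepl p r (a ++ x) = a ++ pvRepl p r x := by
  intro x
  exact pvRepl_skip p r a x (fun m hm => pv_no_prefix_ext _ _ _ (Hd m hm).1 (Hd m hm).2)

-- commuting a pass whose pattern starts with 't' over a block ending in 't': sound as long
-- as the tail cannot complete the pattern (the bridge texts of D_ are exactly where it could)
theorem pvRepl_skip_t (p p' r a : List Char) (hp : p = 't' :: p')
    (Hd : ∀ m, m < a.length - 1 → ¬ p <+: a.drop m ∧ ¬ a.drop m <+: p)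
    (hlast : a.drop (a.length - 1) = ['t']) (hlen : 1 ≤ a.length) :
    ∀ x, ¬ p' <+: x → pvRepl p r (a ++ x) = a ++ pvRepl p r x := by
  intro x hx
  apply pvRepl_skip p r a x
  intro m hm
  by_cases hm' : m < a.length - 1
  · exact pv_no_prefix_ext _ _ _ (Hd m hm').1 (Hd m hm').2
  · have hme : m = a.length - 1 := by omega
    subst hme
    rw [hlast, List.singleton_append, hp]
    intro hcon
    rw [List.cons_prefix_cons] at hcon
    exact hx hcon.2

theorem pv_head_skip (p tp : List Char) (d c : Char) (hp : p = d :: tp) (cs Y : List Char)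
    (hpres : tp <+: Y → tp <+: cs) (hnp : ¬ p <+: c :: cs) : ¬ p <+: c :: Y := by
  intro h
  rw [hp, List.cons_prefix_cons] at h
  exact hnp (hp ▸ List.cons_prefix_cons.mpr ⟨h.1, hpres h.2⟩)

-- ===================== casual scope =====================

def pvCasualChain (s : List Char) : List Char :=
  pvRepl "that is".toList "that's".toList
    (pvRepl "it is".toList "it's".toList
      (pvRepl "will not".toList "won't".toList
        (pvRepl "cannot".toList "can't".toList
          (pvRepl "do not".toList "don't".toList s))))

theorem pvA_casual (text aud : String) :
    (adjust_tone_py text "casual" aud).toList = pvCasualChain text.toList := by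
  unfold adjust_tone_py
  rw [if_pos rfl]
  simp only [List.foldl_cons, List.foldl_nil]
  unfold pvCasualChain
  simp only [PySem.Str.toList_replace]
  rw [pvReplace_eq _ "that is".toList _ (by decide), pvReplace_eq _ "it is".toList _ (by decide),
      pvReplace_eq _ "will not".toList _ (by decide), pvReplace_eq _ "cannot".toList _ (by decide),
      pvReplace_eq _ "do not".toList _ (by decide)]

-- a prefix "hat is" of the text after the first four passes was already there before them
theorem pvCpres (t : List Char) (hbf : ¬ "hat is".toList <+: t) :
    ¬ "hat is".toList <+:
      pvRepl "it is".toList "it's".toList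
        (pvRepl "will not".toList "won't".toList
          (pvRepl "cannot".toList "can't".toList
            (pvRepl "do not".toList "don't".toList t))) := by
  intro h
  exact hbf (pvPres "do not".toList "don't".toList (by decide) "hat is".toList (by decide) _
    (pvPres "cannot".toList "can't".toList (by decide) "hat is".toList (by decide) _
      (pvPres "will not".toList "won't".toList (by decide) "hat is".toList (by decide) _
        (pvPres "it is".toList "it's".toList (by decide) "hat is".toList (by decide) _ h))))

theorem pvCchain1 (t : List Char) (hbf : ¬ "hat is".toList <+: t) :
    pvCasualChain ("do not".toList ++ t) = "don't".toList ++ pvCasualChain t := by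
  unfold pvCasualChain
  rw [pvRepl_match _ _ _ (by decide),
      pvRepl_skip' "cannot".toList "can't".toList "don't".toList (by decide),
      pvRepl_skip' "will not".toList "won't".toList "don't".toList (by decide),
      pvRepl_skip' "it is".toList "it's".toList "don't".toList (by decide),
      pvRepl_skip_t "that is".toList "hat is".toList "that's".toList "don't".toList (by decide)
        (by decide) (by decide) (by decide) _ (pvCpres t hbf)]

theorem pvCchain2 (t : List Char) (hbf : ¬ "hat is".toList <+: t) :
    pvCasualChain ("cannot".toList ++ t) = "can't".toList ++ pvCasualChain t := by
  unfold pvCasualChain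
  rw [pvRepl_skip' "do not".toList "don't".toList "cannot".toList (by decide),
      pvRepl_match _ _ _ (by decide),
      pvRepl_skip' "will not".toList "won't".toList "can't".toList (by decide),
      pvRepl_skip' "it is".toList "it's".toList "can't".toList (by decide),
      pvRepl_skip_t "that is".toList "hat is".toList "that's".toList "can't".toList (by decide)
        (by decide) (by decide) (by decide) _ (pvCpres t hbf)]

theorem pvCchain3 (t : List Char) (hbf : ¬ "hat is".toList <+: t) :
    pvCasualChain ("will not".toList ++ t) = "won't".toList ++ pvCasualChain t := by
  unfold pvCasualChain
  rw [pvRepl_skip' "do not".toList "don't".toList "will not".toList (by decide),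
      pvRepl_skip' "cannot".toList "can't".toList "will not".toList (by decide),
      pvRepl_match _ _ _ (by decide),
      pvRepl_skip' "it is".toList "it's".toList "won't".toList (by decide),
      pvRepl_skip_t "that is".toList "hat is".toList "that's".toList "won't".toList (by decide)
        (by decide) (by decide) (by decide) _ (pvCpres t hbf)]

theorem pvCchain4 (t : List Char) :
    pvCasualChain ("it is".toList ++ t) = "it's".toList ++ pvCasualChain t := by
  unfold pvCasualChain
  rw [pvRepl_skip' "do not".toList "don't".toList "it is".toList (by decide),
      pvRepl_skip' "cannot".toList "can't".toList "it is".toList (by decide),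
      pvRepl_skip' "will not".toList "won't".toList "it is".toList (by decide),
      pvRepl_match _ _ _ (by decide),
      pvRepl_skip' "that is".toList "that's".toList "it's".toList (by decide)]

theorem pvCchain5 (t : List Char) :
    pvCasualChain ("that is".toList ++ t) = "that's".toList ++ pvCasualChain t := by
  unfold pvCasualChain
  rw [pvRepl_skip' "do not".toList "don't".toList "that is".toList (by decide),
      pvRepl_skip' "cannot".toList "can't".toList "that is".toList (by decide),
      pvRepl_skip' "will not".toList "won't".toList "that is".toList (by decide),
      pvRepl_skip' "it is".toList "it's".toList "that is".toList (by decide),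
      pvRepl_match _ _ _ (by decide)]

theorem pvCscan1 (t : List Char) :
    pvScan pvCasualPairs ("do not".toList ++ t) = "don't".toList ++ pvScan pvCasualPairs t := by
  rw [show "do not".toList ++ t = 'd' :: ("o not".toList ++ t) from rfl,
      pvScan_cons_some pvCasualPairs 'd' ("o not".toList ++ t) "do not".toList "don't".toList
        (by unfold pvCasualPairs
            apply List.find?_cons_of_pos
            exact pv_isPrefixOf_true _ _ ⟨t, rfl⟩),
      show ("o not".toList ++ t).drop ("do not".toList.length - 1) = t from by
        rw [show "do not".toList.length - 1 = "o not".toList.length from by decide, List.drop_left]]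

theorem pvCscan2 (t : List Char) :
    pvScan pvCasualPairs ("cannot".toList ++ t) = "can't".toList ++ pvScan pvCasualPairs t := by
  rw [show "cannot".toList ++ t = 'c' :: ("annot".toList ++ t) from rfl,
      pvScan_cons_some pvCasualPairs 'c' ("annot".toList ++ t) "cannot".toList "can't".toList
        (by unfold pvCasualPairs
            refine Eq.trans (List.find?_cons_of_neg (pv_isPrefixOf_false "do not".toList ("cannot".toList ++ t)
              (pv_no_prefix_ext "do not".toList "cannot".toList t (by decide) (by decide)))) ?_
            apply List.find?_cons_of_pos
            exact pv_isPrefixOf_true _ _ ⟨t, rfl⟩),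
      show ("annot".toList ++ t).drop ("cannot".toList.length - 1) = t from by
        rw [show "cannot".toList.length - 1 = "annot".toList.length from by decide, List.drop_left]]

theorem pvCscan3 (t : List Char) :
    pvScan pvCasualPairs ("will not".toList ++ t) = "won't".toList ++ pvScan pvCasualPairs t := by
  rw [show "will not".toList ++ t = 'w' :: ("ill not".toList ++ t) from rfl,
      pvScan_cons_some pvCasualPairs 'w' ("ill not".toList ++ t) "will not".toList "won't".toList
        (by unfold pvCasualPairs
            refine Eq.trans (List.find?_cons_of_neg (pv_isPrefixOf_false "do not".toList ("will not".toList ++ t)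
              (pv_no_prefix_ext "do not".toList "will not".toList t (by decide) (by decide)))) ?_
            refine Eq.trans (List.find?_cons_of_neg (pv_isPrefixOf_false "cannot".toList ("will not".toList ++ t)
              (pv_no_prefix_ext "cannot".toList "will not".toList t (by decide) (by decide)))) ?_
            apply List.find?_cons_of_pos
            exact pv_isPrefixOf_true _ _ ⟨t, rfl⟩),
      show ("ill not".toList ++ t).drop ("will not".toList.length - 1) = t from by
        rw [show "will not".toList.length - 1 = "ill not".toList.length from by decide, List.drop_left]]

theorem pvCscan4 (t : List Char) :
    pvScan pvCasualPairs ("it is".toList ++ t) = "it's".toList ++ pvScan pvCasualPairs t := by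
  rw [show "it is".toList ++ t = 'i' :: ("t is".toList ++ t) from rfl,
      pvScan_cons_some pvCasualPairs 'i' ("t is".toList ++ t) "it is".toList "it's".toList
        (by unfold pvCasualPairs
            refine Eq.trans (List.find?_cons_of_neg (pv_isPrefixOf_false "do not".toList ("it is".toList ++ t)
              (pv_no_prefix_ext "do not".toList "it is".toList t (by decide) (by decide)))) ?_
            refine Eq.trans (List.find?_cons_of_neg (pv_isPrefixOf_false "cannot".toList ("it is".toList ++ t)
              (pv_no_prefix_ext "cannot".toList "it is".toList t (by decide) (by decide)))) ?_
            refine Eq.trans (List.find?_cons_of_neg (pv_isPrefixOf_false "will not".toList ("it is".toList ++ t)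
              (pv_no_prefix_ext "will not".toList "it is".toList t (by decide) (by decide)))) ?_
            apply List.find?_cons_of_pos
            exact pv_isPrefixOf_true _ _ ⟨t, rfl⟩),
      show ("t is".toList ++ t).drop ("it is".toList.length - 1) = t from by
        rw [show "it is".toList.length - 1 = "t is".toList.length from by decide, List.drop_left]]

theorem pvCscan5 (t : List Char) :
    pvScan pvCasualPairs ("that is".toList ++ t) = "that's".toList ++ pvScan pvCasualPairs t := by
  rw [show "that is".toList ++ t = 't' :: ("hat is".toList ++ t) from rfl,
      pvScan_cons_some pvCasualPairs 't' ("hat is".toList ++ t) "that is".toList "that's".toList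
        (by unfold pvCasualPairs
            refine Eq.trans (List.find?_cons_of_neg (pv_isPrefixOf_false "do not".toList ("that is".toList ++ t)
              (pv_no_prefix_ext "do not".toList "that is".toList t (by decide) (by decide)))) ?_
            refine Eq.trans (List.find?_cons_of_neg (pv_isPrefixOf_false "cannot".toList ("that is".toList ++ t)
              (pv_no_prefix_ext "cannot".toList "that is".toList t (by decide) (by decide)))) ?_
            refine Eq.trans (List.find?_cons_of_neg (pv_isPrefixOf_false "will not".toList ("that is".toList ++ t)
              (pv_no_prefix_ext "will not".toList "that is".toList t (by decide) (by decide)))) ?_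
            refine Eq.trans (List.find?_cons_of_neg (pv_isPrefixOf_false "it is".toList ("that is".toList ++ t)
              (pv_no_prefix_ext "it is".toList "that is".toList t (by decide) (by decide)))) ?_
            apply List.find?_cons_of_pos
            exact pv_isPrefixOf_true _ _ ⟨t, rfl⟩),
      show ("hat is".toList ++ t).drop ("that is".toList.length - 1) = t from by
        rw [show "that is".toList.length - 1 = "hat is".toList.length from by decide, List.drop_left]]

theorem pvMasterC : ∀ (n : Nat) (s : List Char), s.length ≤ n →
    ¬ "do nothat is".toList <:+: s → ¬ "cannothat is".toList <:+: s →
    ¬ "will nothat is".toList <:+: s →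
    pvCasualChain s = pvScan pvCasualPairs s := by
  intro n
  induction n with
  | zero =>
    intro s hs _ _ _
    have hnil : s = [] := by cases s with | nil => rfl | cons a b => simp at hs
    subst hnil
    unfold pvCasualChain
    rw [pvRepl_nil, pvRepl_nil, pvRepl_nil, pvRepl_nil, pvRepl_nil]
    rfl
  | succ n ih =>
    intro s hs h1 h2 h3
    cases s with
    | nil =>
      unfold pvCasualChain
      rw [pvRepl_nil, pvRepl_nil, pvRepl_nil, pvRepl_nil, pvRepl_nil]
      rfl
    | cons c cs =>
      have hclose : ∀ (b : List Char), ¬ b <:+: (c :: cs) → ¬ b <:+: cs :=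
        fun b hb h => hb (h.trans (List.suffix_cons c cs).isInfix)
      by_cases hp1 : "do not".toList <+: (c :: cs)
      · obtain ⟨t, ht⟩ := hp1
        have hbf : ¬ "hat is".toList <+: t := by
          intro hpre
          apply h1
          refine List.IsPrefix.isInfix ?_
          rw [← ht, show "do nothat is".toList = "do not".toList ++ "hat is".toList from by decide]
          obtain ⟨u, hu⟩ := hpre
          exact ⟨u, by rw [List.append_assoc, hu]⟩
        have hlt : t.length ≤ n := by
          have hl := congrArg List.length ht
          simp only [List.length_append, List.length_cons] at hl
          rw [show "do not".toList.length = 6 from by decide] at hl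
          simp only [List.length_cons] at hs
          omega
        have hsuf : t <:+ c :: cs := ⟨"do not".toList, ht⟩
        have hcl : ∀ (b : List Char), ¬ b <:+: (c :: cs) → ¬ b <:+: t :=
          fun b hb h => hb (h.trans hsuf.isInfix)
        rw [← ht, pvCchain1 t hbf, pvCscan1 t,
            ih t hlt (hcl _ h1) (hcl _ h2) (hcl _ h3)]
      · by_cases hp2 : "cannot".toList <+: (c :: cs)
        · obtain ⟨t, ht⟩ := hp2
          have hbf : ¬ "hat is".toList <+: t := by
            intro hpre
            apply h2
            refine List.IsPrefix.isInfix ?_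
            rw [← ht, show "cannothat is".toList = "cannot".toList ++ "hat is".toList from by decide]
            obtain ⟨u, hu⟩ := hpre
            exact ⟨u, by rw [List.append_assoc, hu]⟩
          have hlt : t.length ≤ n := by
            have hl := congrArg List.length ht
            simp only [List.length_append, List.length_cons] at hl
            rw [show "cannot".toList.length = 6 from by decide] at hl
            simp only [List.length_cons] at hs
            omega
          have hsuf : t <:+ c :: cs := ⟨"cannot".toList, ht⟩
          have hcl : ∀ (b : List Char), ¬ b <:+: (c :: cs) → ¬ b <:+: t :=
            fun b hb h => hb (h.trans hsuf.isInfix)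
          rw [← ht, pvCchain2 t hbf, pvCscan2 t,
              ih t hlt (hcl _ h1) (hcl _ h2) (hcl _ h3)]
        · by_cases hp3 : "will not".toList <+: (c :: cs)
          · obtain ⟨t, ht⟩ := hp3
            have hbf : ¬ "hat is".toList <+: t := by
              intro hpre
              apply h3
              refine List.IsPrefix.isInfix ?_
              rw [← ht, show "will nothat is".toList = "will not".toList ++ "hat is".toList from by decide]
              obtain ⟨u, hu⟩ := hpre
              exact ⟨u, by rw [List.append_assoc, hu]⟩
            have hlt : t.length ≤ n := by
              have hl := congrArg List.length ht
              simp only [List.length_append, List.length_cons] at hl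
              rw [show "will not".toList.length = 8 from by decide] at hl
              simp only [List.length_cons] at hs
              omega
            have hsuf : t <:+ c :: cs := ⟨"will not".toList, ht⟩
            have hcl : ∀ (b : List Char), ¬ b <:+: (c :: cs) → ¬ b <:+: t :=
              fun b hb h => hb (h.trans hsuf.isInfix)
            rw [← ht, pvCchain3 t hbf, pvCscan3 t,
                ih t hlt (hcl _ h1) (hcl _ h2) (hcl _ h3)]
          · by_cases hp4 : "it is".toList <+: (c :: cs)
            · obtain ⟨t, ht⟩ := hp4
              have hlt : t.length ≤ n := by
                have hl := congrArg List.length ht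
                simp only [List.length_append, List.length_cons] at hl
                rw [show "it is".toList.length = 5 from by decide] at hl
                simp only [List.length_cons] at hs
                omega
              have hsuf : t <:+ c :: cs := ⟨"it is".toList, ht⟩
              have hcl : ∀ (b : List Char), ¬ b <:+: (c :: cs) → ¬ b <:+: t :=
                fun b hb h => hb (h.trans hsuf.isInfix)
              rw [← ht, pvCchain4 t, pvCscan4 t,
                  ih t hlt (hcl _ h1) (hcl _ h2) (hcl _ h3)]
            · by_cases hp5 : "that is".toList <+: (c :: cs)
              · obtain ⟨t, ht⟩ := hp5
                have hlt : t.length ≤ n := by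
                  have hl := congrArg List.length ht
                  simp only [List.length_append, List.length_cons] at hl
                  rw [show "that is".toList.length = 7 from by decide] at hl
                  simp only [List.length_cons] at hs
                  omega
                have hsuf : t <:+ c :: cs := ⟨"that is".toList, ht⟩
                have hcl : ∀ (b : List Char), ¬ b <:+: (c :: cs) → ¬ b <:+: t :=
                  fun b hb h => hb (h.trans hsuf.isInfix)
                rw [← ht, pvCchain5 t, pvCscan5 t,
                    ih t hlt (hcl _ h1) (hcl _ h2) (hcl _ h3)]
              · -- no pattern matches at the head: every pass keeps c and recurses on cs
                have c1 : pvRepl "do not".toList "don't".toList (c :: cs) =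
                    c :: pvRepl "do not".toList "don't".toList cs :=
                  pvRepl_cons_neg _ _ _ _ hp1
                have n2 : ¬ "cannot".toList <+: c :: pvRepl "do not".toList "don't".toList cs :=
                  pv_head_skip "cannot".toList "annot".toList 'c' c (by decide) cs _
                    (fun h => pvPres "do not".toList "don't".toList (by decide) "annot".toList
                      (by decide) cs h) hp2
                have c2 := pvRepl_cons_neg "cannot".toList "can't".toList c _ n2
                have n3 : ¬ "will not".toList <+: c :: pvRepl "cannot".toList "can't".toList
                    (pvRepl "do not".toList "don't".toList cs) :=
                  pv_head_skip "will not".toList "ill not".toList 'w' c (by decide) cs _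
                    (fun h => pvPres "do not".toList "don't".toList (by decide) "ill not".toList
                      (by decide) cs
                      (pvPres "cannot".toList "can't".toList (by decide) "ill not".toList
                        (by decide) _ h)) hp3
                have c3 := pvRepl_cons_neg "will not".toList "won't".toList c _ n3
                have n4 : ¬ "it is".toList <+: c :: pvRepl "will not".toList "won't".toList
                    (pvRepl "cannot".toList "can't".toList
                      (pvRepl "do not".toList "don't".toList cs)) :=
                  pv_head_skip "it is".toList "t is".toList 'i' c (by decide) cs _
                    (fun h => pvPres "do not".toList "don't".toList (by decide) "t is".toList
                      (by decide) cs
                      (pvPres "cannot".toList "can't".toList (by decide) "t is".toList (by decide) _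
                        (pvPres "will not".toList "won't".toList (by decide) "t is".toList
                          (by decide) _ h))) hp4
                have c4 := pvRepl_cons_neg "it is".toList "it's".toList c _ n4
                have n5 : ¬ "that is".toList <+: c :: pvRepl "it is".toList "it's".toList
                    (pvRepl "will not".toList "won't".toList
                      (pvRepl "cannot".toList "can't".toList
                        (pvRepl "do not".toList "don't".toList cs))) :=
                  pv_head_skip "that is".toList "hat is".toList 't' c (by decide) cs _
                    (fun h => pvPres "do not".toList "don't".toList (by decide) "hat is".toList
                      (by decide) cs
                      (pvPres "cannot".toList "can't".toList (by decide) "hat is".toList (by decide) _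
                        (pvPres "will not".toList "won't".toList (by decide) "hat is".toList
                          (by decide) _
                          (pvPres "it is".toList "it's".toList (by decide) "hat is".toList
                            (by decide) _ h)))) hp5
                have c5 := pvRepl_cons_neg "that is".toList "that's".toList c _ n5
                have hfind : pvCasualPairs.find? (fun pr => pr.1.isPrefixOf (c :: cs)) = none := by
                  rw [List.find?_eq_none]
                  intro pr hpr
                  simp only [pvCasualPairs, List.mem_cons, List.not_mem_nil, or_false] at hpr
                  rcases hpr with h | h | h | h | h
                  · subst h; exact pv_isPrefixOf_false _ _ hp1
                  · subst h; exact pv_isPrefixOf_false _ _ hp2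
                  · subst h; exact pv_isPrefixOf_false _ _ hp3
                  · subst h; exact pv_isPrefixOf_false _ _ hp4
                  · subst h; exact pv_isPrefixOf_false _ _ hp5
                have e : pvCasualChain (c :: cs) = c :: pvCasualChain cs := by
                  unfold pvCasualChain
                  rw [c1, c2, c3, c4, c5]
                rw [e, pvScan_cons_none _ _ _ hfind,
                    ih cs (by simp only [List.length_cons] at hs; omega)
                      (hclose _ h1) (hclose _ h2) (hclose _ h3)]

-- ===================== academic scope =====================

def pvAcademicChain (s : List Char) : List Char :=
  pvRepl "that's".toList "that is".toList
    (pvRepl "it's".toList "it is".toList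
      (pvRepl "won't".toList "will not".toList
        (pvRepl "can't".toList "cannot".toList
          (pvRepl "don't".toList "do not".toList s))))

theorem pvA_academic (text aud : String) :
    (adjust_tone_py text "academic" aud).toList = pvAcademicChain text.toList := by
  unfold adjust_tone_py
  rw [if_neg (by decide), if_pos rfl]
  simp only [List.foldl_cons, List.foldl_nil]
  unfold pvAcademicChain
  simp only [PySem.Str.toList_replace]
  rw [pvReplace_eq _ "that's".toList _ (by decide), pvReplace_eq _ "it's".toList _ (by decide),
      pvReplace_eq _ "won't".toList _ (by decide), pvReplace_eq _ "can't".toList _ (by decide),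
      pvReplace_eq _ "don't".toList _ (by decide)]

theorem pvApres (t : List Char) (hbf : ¬ "hat's".toList <+: t) :
    ¬ "hat's".toList <+:
      pvRepl "it's".toList "it is".toList
        (pvRepl "won't".toList "will not".toList
          (pvRepl "can't".toList "cannot".toList
            (pvRepl "don't".toList "do not".toList t))) := by
  intro h
  exact hbf (pvPres "don't".toList "do not".toList (by decide) "hat's".toList (by decide) _
    (pvPres "can't".toList "cannot".toList (by decide) "hat's".toList (by decide) _
      (pvPres "won't".toList "will not".toList (by decide) "hat's".toList (by decide) _
        (pvPres "it's".toList "it is".toList (by decide) "hat's".toList (by decide) _ h))))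

theorem pvAchain1 (t : List Char) (hbf : ¬ "hat's".toList <+: t) :
    pvAcademicChain ("don't".toList ++ t) = "do not".toList ++ pvAcademicChain t := by
  unfold pvAcademicChain
  rw [pvRepl_match _ _ _ (by decide),
      pvRepl_skip' "can't".toList "cannot".toList "do not".toList (by decide),
      pvRepl_skip' "won't".toList "will not".toList "do not".toList (by decide),
      pvRepl_skip' "it's".toList "it is".toList "do not".toList (by decide),
      pvRepl_skip_t "that's".toList "hat's".toList "that is".toList "do not".toList (by decide)
        (by decide) (by decide) (by decide) _ (pvApres t hbf)]

theorem pvAchain2 (t : List Char) (hbf : ¬ "hat's".toList <+: t) :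
    pvAcademicChain ("can't".toList ++ t) = "cannot".toList ++ pvAcademicChain t := by
  unfold pvAcademicChain
  rw [pvRepl_skip' "don't".toList "do not".toList "can't".toList (by decide),
      pvRepl_match _ _ _ (by decide),
      pvRepl_skip' "won't".toList "will not".toList "cannot".toList (by decide),
      pvRepl_skip' "it's".toList "it is".toList "cannot".toList (by decide),
      pvRepl_skip_t "that's".toList "hat's".toList "that is".toList "cannot".toList (by decide)
        (by decide) (by decide) (by decide) _ (pvApres t hbf)]

theorem pvAchain3 (t : List Char) (hbf : ¬ "hat's".toList <+: t) :
    pvAcademicChain ("won't".toList ++ t) = "will not".toList ++ pvAcademicChain t := by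
  unfold pvAcademicChain
  rw [pvRepl_skip' "don't".toList "do not".toList "won't".toList (by decide),
      pvRepl_skip' "can't".toList "cannot".toList "won't".toList (by decide),
      pvRepl_match _ _ _ (by decide),
      pvRepl_skip' "it's".toList "it is".toList "will not".toList (by decide),
      pvRepl_skip_t "that's".toList "hat's".toList "that is".toList "will not".toList (by decide)
        (by decide) (by decide) (by decide) _ (pvApres t hbf)]

theorem pvAchain4 (t : List Char) :
    pvAcademicChain ("it's".toList ++ t) = "it is".toList ++ pvAcademicChain t := by
  unfold pvAcademicChain
  rw [pvRepl_skip' "don't".toList "do not".toList "it's".toList (by decide),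
      pvRepl_skip' "can't".toList "cannot".toList "it's".toList (by decide),
      pvRepl_skip' "won't".toList "will not".toList "it's".toList (by decide),
      pvRepl_match _ _ _ (by decide),
      pvRepl_skip' "that's".toList "that is".toList "it is".toList (by decide)]

theorem pvAchain5 (t : List Char) :
    pvAcademicChain ("that's".toList ++ t) = "that is".toList ++ pvAcademicChain t := by
  unfold pvAcademicChain
  rw [pvRepl_skip' "don't".toList "do not".toList "that's".toList (by decide),
      pvRepl_skip' "can't".toList "cannot".toList "that's".toList (by decide),
      pvRepl_skip' "won't".toList "will not".toList "that's".toList (by decide),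
      pvRepl_skip' "it's".toList "it is".toList "that's".toList (by decide),
      pvRepl_match _ _ _ (by decide)]

theorem pvAscan1 (t : List Char) :
    pvScan pvAcademicPairs ("don't".toList ++ t) = "do not".toList ++ pvScan pvAcademicPairs t := by
  rw [show "don't".toList ++ t = 'd' :: ("on't".toList ++ t) from rfl,
      pvScan_cons_some pvAcademicPairs 'd' ("on't".toList ++ t) "don't".toList "do not".toList
        (by unfold pvAcademicPairs
            apply List.find?_cons_of_pos
            exact pv_isPrefixOf_true _ _ ⟨t, rfl⟩),
      show ("on't".toList ++ t).drop ("don't".toList.length - 1) = t from by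
        rw [show "don't".toList.length - 1 = "on't".toList.length from by decide, List.drop_left]]

theorem pvAscan2 (t : List Char) :
    pvScan pvAcademicPairs ("can't".toList ++ t) = "cannot".toList ++ pvScan pvAcademicPairs t := by
  rw [show "can't".toList ++ t = 'c' :: ("an't".toList ++ t) from rfl,
      pvScan_cons_some pvAcademicPairs 'c' ("an't".toList ++ t) "can't".toList "cannot".toList
        (by unfold pvAcademicPairs
            refine Eq.trans (List.find?_cons_of_neg (pv_isPrefixOf_false "don't".toList ("can't".toList ++ t)
              (pv_no_prefix_ext "don't".toList "can't".toList t (by decide) (by decide)))) ?_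
            apply List.find?_cons_of_pos
            exact pv_isPrefixOf_true _ _ ⟨t, rfl⟩),
      show ("an't".toList ++ t).drop ("can't".toList.length - 1) = t from by
        rw [show "can't".toList.length - 1 = "an't".toList.length from by decide, List.drop_left]]

theorem pvAscan3 (t : List Char) :
    pvScan pvAcademicPairs ("won't".toList ++ t) = "will not".toList ++ pvScan pvAcademicPairs t := by
  rw [show "won't".toList ++ t = 'w' :: ("on't".toList ++ t) from rfl,
      pvScan_cons_some pvAcademicPairs 'w' ("on't".toList ++ t) "won't".toList "will not".toList
        (by unfold pvAcademicPairs
            refine Eq.trans (List.find?_cons_of_neg (pv_isPrefixOf_false "don't".toList ("won't".toList ++ t)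
              (pv_no_prefix_ext "don't".toList "won't".toList t (by decide) (by decide)))) ?_
            refine Eq.trans (List.find?_cons_of_neg (pv_isPrefixOf_false "can't".toList ("won't".toList ++ t)
              (pv_no_prefix_ext "can't".toList "won't".toList t (by decide) (by decide)))) ?_
            apply List.find?_cons_of_pos
            exact pv_isPrefixOf_true _ _ ⟨t, rfl⟩),
      show ("on't".toList ++ t).drop ("won't".toList.length - 1) = t from by
        rw [show "won't".toList.length - 1 = "on't".toList.length from by decide, List.drop_left]]

theorem pvAscan4 (t : List Char) :
    pvScan pvAcademicPairs ("it's".toList ++ t) = "it is".toList ++ pvScan pvAcademicPairs t := by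
  rw [show "it's".toList ++ t = 'i' :: ("t's".toList ++ t) from rfl,
      pvScan_cons_some pvAcademicPairs 'i' ("t's".toList ++ t) "it's".toList "it is".toList
        (by unfold pvAcademicPairs
            refine Eq.trans (List.find?_cons_of_neg (pv_isPrefixOf_false "don't".toList ("it's".toList ++ t)
              (pv_no_prefix_ext "don't".toList "it's".toList t (by decide) (by decide)))) ?_
            refine Eq.trans (List.find?_cons_of_neg (pv_isPrefixOf_false "can't".toList ("it's".toList ++ t)
              (pv_no_prefix_ext "can't".toList "it's".toList t (by decide) (by decide)))) ?_
            refine Eq.trans (List.find?_cons_of_neg (pv_isPrefixOf_false "won't".toList ("it's".toList ++ t)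
              (pv_no_prefix_ext "won't".toList "it's".toList t (by decide) (by decide)))) ?_
            apply List.find?_cons_of_pos
            exact pv_isPrefixOf_true _ _ ⟨t, rfl⟩),
      show ("t's".toList ++ t).drop ("it's".toList.length - 1) = t from by
        rw [show "it's".toList.length - 1 = "t's".toList.length from by decide, List.drop_left]]

theorem pvAscan5 (t : List Char) :
    pvScan pvAcademicPairs ("that's".toList ++ t) = "that is".toList ++ pvScan pvAcademicPairs t := by
  rw [show "that's".toList ++ t = 't' :: ("hat's".toList ++ t) from rfl,
      pvScan_cons_some pvAcademicPairs 't' ("hat's".toList ++ t) "that's".toList "that is".toList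
        (by unfold pvAcademicPairs
            refine Eq.trans (List.find?_cons_of_neg (pv_isPrefixOf_false "don't".toList ("that's".toList ++ t)
              (pv_no_prefix_ext "don't".toList "that's".toList t (by decide) (by decide)))) ?_
            refine Eq.trans (List.find?_cons_of_neg (pv_isPrefixOf_false "can't".toList ("that's".toList ++ t)
              (pv_no_prefix_ext "can't".toList "that's".toList t (by decide) (by decide)))) ?_
            refine Eq.trans (List.find?_cons_of_neg (pv_isPrefixOf_false "won't".toList ("that's".toList ++ t)
              (pv_no_prefix_ext "won't".toList "that's".toList t (by decide) (by decide)))) ?_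
            refine Eq.trans (List.find?_cons_of_neg (pv_isPrefixOf_false "it's".toList ("that's".toList ++ t)
              (pv_no_prefix_ext "it's".toList "that's".toList t (by decide) (by decide)))) ?_
            apply List.find?_cons_of_pos
            exact pv_isPrefixOf_true _ _ ⟨t, rfl⟩),
      show ("hat's".toList ++ t).drop ("that's".toList.length - 1) = t from by
        rw [show "that's".toList.length - 1 = "hat's".toList.length from by decide, List.drop_left]]

theorem pvMasterA : ∀ (n : Nat) (s : List Char), s.length ≤ n →
    ¬ "don'that's".toList <:+: s → ¬ "can'that's".toList <:+: s →
    ¬ "won'that's".toList <:+: s →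
    pvAcademicChain s = pvScan pvAcademicPairs s := by
  intro n
  induction n with
  | zero =>
    intro s hs _ _ _
    have hnil : s = [] := by cases s with | nil => rfl | cons a b => simp at hs
    subst hnil
    unfold pvAcademicChain
    rw [pvRepl_nil, pvRepl_nil, pvRepl_nil, pvRepl_nil, pvRepl_nil]
    rfl
  | succ n ih =>
    intro s hs h1 h2 h3
    cases s with
    | nil =>
      unfold pvAcademicChain
      rw [pvRepl_nil, pvRepl_nil, pvRepl_nil, pvRepl_nil, pvRepl_nil]
      rfl
    | cons c cs =>
      have hclose : ∀ (b : List Char), ¬ b <:+: (c :: cs) → ¬ b <:+: cs :=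
        fun b hb h => hb (h.trans (List.suffix_cons c cs).isInfix)
      by_cases hp1 : "don't".toList <+: (c :: cs)
      · obtain ⟨t, ht⟩ := hp1
        have hbf : ¬ "hat's".toList <+: t := by
          intro hpre
          apply h1
          refine List.IsPrefix.isInfix ?_
          rw [← ht, show "don'that's".toList = "don't".toList ++ "hat's".toList from by decide]
          obtain ⟨u, hu⟩ := hpre
          exact ⟨u, by rw [List.append_assoc, hu]⟩
        have hlt : t.length ≤ n := by
          have hl := congrArg List.length ht
          simp only [List.length_append, List.length_cons] at hl
          rw [show "don't".toList.length = 5 from by decide] at hl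
          simp only [List.length_cons] at hs
          omega
        have hsuf : t <:+ c :: cs := ⟨"don't".toList, ht⟩
        have hcl : ∀ (b : List Char), ¬ b <:+: (c :: cs) → ¬ b <:+: t :=
          fun b hb h => hb (h.trans hsuf.isInfix)
        rw [← ht, pvAchain1 t hbf, pvAscan1 t,
            ih t hlt (hcl _ h1) (hcl _ h2) (hcl _ h3)]
      · by_cases hp2 : "can't".toList <+: (c :: cs)
        · obtain ⟨t, ht⟩ := hp2
          have hbf : ¬ "hat's".toList <+: t := by
            intro hpre
            apply h2
            refine List.IsPrefix.isInfix ?_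
            rw [← ht, show "can'that's".toList = "can't".toList ++ "hat's".toList from by decide]
            obtain ⟨u, hu⟩ := hpre
            exact ⟨u, by rw [List.append_assoc, hu]⟩
          have hlt : t.length ≤ n := by
            have hl := congrArg List.length ht
            simp only [List.length_append, List.length_cons] at hl
            rw [show "can't".toList.length = 5 from by decide] at hl
            simp only [List.length_cons] at hs
            omega
          have hsuf : t <:+ c :: cs := ⟨"can't".toList, ht⟩
          have hcl : ∀ (b : List Char), ¬ b <:+: (c :: cs) → ¬ b <:+: t :=
            fun b hb h => hb (h.trans hsuf.isInfix)
          rw [← ht, pvAchain2 t hbf, pvAscan2 t,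
              ih t hlt (hcl _ h1) (hcl _ h2) (hcl _ h3)]
        · by_cases hp3 : "won't".toList <+: (c :: cs)
          · obtain ⟨t, ht⟩ := hp3
            have hbf : ¬ "hat's".toList <+: t := by
              intro hpre
              apply h3
              refine List.IsPrefix.isInfix ?_
              rw [← ht, show "won'that's".toList = "won't".toList ++ "hat's".toList from by decide]
              obtain ⟨u, hu⟩ := hpre
              exact ⟨u, by rw [List.append_assoc, hu]⟩
            have hlt : t.length ≤ n := by
              have hl := congrArg List.length ht
              simp only [List.length_append, List.length_cons] at hl
              rw [show "won't".toList.length = 5 from by decide] at hl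
              simp only [List.length_cons] at hs
              omega
            have hsuf : t <:+ c :: cs := ⟨"won't".toList, ht⟩
            have hcl : ∀ (b : List Char), ¬ b <:+: (c :: cs) → ¬ b <:+: t :=
              fun b hb h => hb (h.trans hsuf.isInfix)
            rw [← ht, pvAchain3 t hbf, pvAscan3 t,
                ih t hlt (hcl _ h1) (hcl _ h2) (hcl _ h3)]
          · by_cases hp4 : "it's".toList <+: (c :: cs)
            · obtain ⟨t, ht⟩ := hp4
              have hlt : t.length ≤ n := by
                have hl := congrArg List.length ht
                simp only [List.length_append, List.length_cons] at hl
                rw [show "it's".toList.length = 4 from by decide] at hl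
                simp only [List.length_cons] at hs
                omega
              have hsuf : t <:+ c :: cs := ⟨"it's".toList, ht⟩
              have hcl : ∀ (b : List Char), ¬ b <:+: (c :: cs) → ¬ b <:+: t :=
                fun b hb h => hb (h.trans hsuf.isInfix)
              rw [← ht, pvAchain4 t, pvAscan4 t,
                  ih t hlt (hcl _ h1) (hcl _ h2) (hcl _ h3)]
            · by_cases hp5 : "that's".toList <+: (c :: cs)
              · obtain ⟨t, ht⟩ := hp5
                have hlt : t.length ≤ n := by
                  have hl := congrArg List.length ht
                  simp only [List.length_append, List.length_cons] at hl
                  rw [show "that's".toList.length = 6 from by decide] at hl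
                  simp only [List.length_cons] at hs
                  omega
                have hsuf : t <:+ c :: cs := ⟨"that's".toList, ht⟩
                have hcl : ∀ (b : List Char), ¬ b <:+: (c :: cs) → ¬ b <:+: t :=
                  fun b hb h => hb (h.trans hsuf.isInfix)
                rw [← ht, pvAchain5 t, pvAscan5 t,
                    ih t hlt (hcl _ h1) (hcl _ h2) (hcl _ h3)]
              · -- no pattern matches at the head: every pass keeps c and recurses on cs
                have c1 : pvRepl "don't".toList "do not".toList (c :: cs) =
                    c :: pvRepl "don't".toList "do not".toList cs :=
                  pvRepl_cons_neg _ _ _ _ hp1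
                have n2 : ¬ "can't".toList <+: c :: pvRepl "don't".toList "do not".toList cs :=
                  pv_head_skip "can't".toList "an't".toList 'c' c (by decide) cs _
                    (fun h => pvPres "don't".toList "do not".toList (by decide) "an't".toList
                      (by decide) cs h) hp2
                have c2 := pvRepl_cons_neg "can't".toList "cannot".toList c _ n2
                have n3 : ¬ "won't".toList <+: c :: pvRepl "can't".toList "cannot".toList
                    (pvRepl "don't".toList "do not".toList cs) :=
                  pv_head_skip "won't".toList "on't".toList 'w' c (by decide) cs _
                    (fun h => pvPres "don't".toList "do not".toList (by decide) "on't".toList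
                      (by decide) cs
                      (pvPres "can't".toList "cannot".toList (by decide) "on't".toList
                        (by decide) _ h)) hp3
                have c3 := pvRepl_cons_neg "won't".toList "will not".toList c _ n3
                have n4 : ¬ "it's".toList <+: c :: pvRepl "won't".toList "will not".toList
                    (pvRepl "can't".toList "cannot".toList
                      (pvRepl "don't".toList "do not".toList cs)) :=
                  pv_head_skip "it's".toList "t's".toList 'i' c (by decide) cs _
                    (fun h => pvPres "don't".toList "do not".toList (by decide) "t's".toList
                      (by decide) cs
                      (pvPres "can't".toList "cannot".toList (by decide) "t's".toList (by decide) _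
                        (pvPres "won't".toList "will not".toList (by decide) "t's".toList
                          (by decide) _ h))) hp4
                have c4 := pvRepl_cons_neg "it's".toList "it is".toList c _ n4
                have n5 : ¬ "that's".toList <+: c :: pvRepl "it's".toList "it is".toList
                    (pvRepl "won't".toList "will not".toList
                      (pvRepl "can't".toList "cannot".toList
                        (pvRepl "don't".toList "do not".toList cs))) :=
                  pv_head_skip "that's".toList "hat's".toList 't' c (by decide) cs _
                    (fun h => pvPres "don't".toList "do not".toList (by decide) "hat's".toList
                      (by decide) cs
                      (pvPres "can't".toList "cannot".toList (by decide) "hat's".toList (by decide) _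
                        (pvPres "won't".toList "will not".toList (by decide) "hat's".toList
                          (by decide) _
                          (pvPres "it's".toList "it is".toList (by decide) "hat's".toList
                            (by decide) _ h)))) hp5
                have c5 := pvRepl_cons_neg "that's".toList "that is".toList c _ n5
                have hfind : pvAcademicPairs.find? (fun pr => pr.1.isPrefixOf (c :: cs)) = none := by
                  rw [List.find?_eq_none]
                  intro pr hpr
                  simp only [pvAcademicPairs, List.mem_cons, List.not_mem_nil, or_false] at hpr
                  rcases hpr with h | h | h | h | h
                  · subst h; exact pv_isPrefixOf_false _ _ hp1
                  · subst h; exact pv_isPrefixOf_false _ _ hp2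
                  · subst h; exact pv_isPrefixOf_false _ _ hp3
                  · subst h; exact pv_isPrefixOf_false _ _ hp4
                  · subst h; exact pv_isPrefixOf_false _ _ hp5
                have e : pvAcademicChain (c :: cs) = c :: pvAcademicChain cs := by
                  unfold pvAcademicChain
                  rw [c1, c2, c3, c4, c5]
                rw [e, pvScan_cons_none _ _ _ hfind,
                    ih cs (by simp only [List.length_cons] at hs; omega)
                      (hclose _ h1) (hclose _ h2) (hclose _ h3)]

-- ===== VERDICT (by name: the statement is the Claim_ definition above) =====
theorem adjust_tone_py_spec : Claim_equal_adjust_tone_py := by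
  intro text scope aud _
  unfold Pre_adjust_tone_py Spec_adjust_tone_py
  intro hpre
  by_cases hc : scope = "casual"
  · subst hc
    obtain ⟨hb1, hb2, hb3⟩ := hpre.1 rfl
    have hni : ∀ (sub : String), PySem.Str.isIn sub text = false → ¬ sub.toList <:+: text.toList :=
      fun sub hf hin => by rw [(PySem.Str.isIn_iff_infix _ _).mpr hin] at hf; cases hf
    apply String.toList_inj.mp
    rw [pvA_casual,
        show adjust_tone_py_alt text "casual" aud = String.ofList (pvScan pvCasualPairs text.toList)
          from by unfold adjust_tone_py_alt; rw [if_pos rfl],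
        String.toList_ofList]
    exact pvMasterC text.toList.length text.toList (le_refl _)
      (hni _ hb1) (hni _ hb2) (hni _ hb3)
  · by_cases ha : scope = "academic"
    · subst ha
      obtain ⟨hb1, hb2, hb3⟩ := hpre.2 rfl
      have hni : ∀ (sub : String), PySem.Str.isIn sub text = false → ¬ sub.toList <:+: text.toList :=
        fun sub hf hin => by rw [(PySem.Str.isIn_iff_infix _ _).mpr hin] at hf; cases hf
      apply String.toList_inj.mp
      rw [pvA_academic,
          show adjust_tone_py_alt text "academic" aud =
              String.ofList (pvScan pvAcademicPairs text.toList)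
            from by unfold adjust_tone_py_alt; rw [if_neg (by decide), if_pos rfl],
          String.toList_ofList]
      exact pvMasterA text.toList.length text.toList (le_refl _)
        (hni _ hb1) (hni _ hb2) (hni _ hb3)
    · show adjust_tone_py text scope aud = adjust_tone_py_alt text scope aud
      unfold adjust_tone_py adjust_tone_py_alt
      rw [if_neg hc, if_neg ha, if_neg hc, if_neg ha]
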